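-- pv_equiv track=rewrite | github.com/kevin30205/Repository-Hub | update_readme.py | project_statistics
-- ===== SOURCE A (Python) =====
-- def project_statistics(repos):
--     """
--     Return a summary of total, public, and private repo counts.
--     """
--
--     # Count total, public, and private repositories
--     total = len(repos)
--     public = sum(1 for r in repos if not r.get('private', False))
--     private = sum(1 for r in repos if r.get('private', False))
--
--     table = (
--         f'| Type   | Count |\n'
--         f'|--------|-------|\n'
--         f'| Total  | {total} |\n'
--         f'| Public | {public} |\n'
--         f'| Private| {private} |\n'
--     )
--     return table
-- ===== SOURCE B (Python) =====
-- def project_statistics(repos):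
--     """
--     Return a summary of total, public, and private repo counts.
--     """
--     # Histogram over the privacy flag: one dict-counting pass, no predicate scans.
--     counts = {False: 0, True: 0}
--     for r in repos:
--         counts[bool(r.get('private', False))] += 1
--     public = counts[False]
--     private = counts[True]
--     total = public + private
--
--     table = (
--         f'| Type   | Count |\n'
--         f'|--------|-------|\n'
--         f'| Total  | {total} |\n'
--         f'| Public | {public} |\n'
--         f'| Private| {private} |\n'
--     )
--     return table
-- ===== Notes on version B (the rewrite author's own statement) =====
-- stated objective: alternative
-- what changed: Replaces A's len() plus two independent predicate scans with a single histogram pass that tallies the privacy flag into a dict keyed by the boolean, reading total as the sum of the two bucket counts.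
import Mathlib
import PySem

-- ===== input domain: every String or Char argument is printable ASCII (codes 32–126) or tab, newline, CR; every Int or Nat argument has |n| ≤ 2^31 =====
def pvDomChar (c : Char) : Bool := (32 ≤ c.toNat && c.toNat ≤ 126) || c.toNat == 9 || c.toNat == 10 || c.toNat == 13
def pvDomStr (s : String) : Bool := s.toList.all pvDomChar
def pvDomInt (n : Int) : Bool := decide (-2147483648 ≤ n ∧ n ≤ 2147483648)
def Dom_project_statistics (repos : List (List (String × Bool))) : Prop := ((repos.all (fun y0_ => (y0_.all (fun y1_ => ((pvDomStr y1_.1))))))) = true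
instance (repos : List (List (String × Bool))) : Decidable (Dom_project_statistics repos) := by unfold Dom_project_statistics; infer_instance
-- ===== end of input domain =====

-- B replaces A's len() and two predicate scans with one histogram pass over the privacy flag
-- (a dict keyed by the boolean), deriving total as the sum of the two buckets (alternative).
-- ===== PORT A =====
def project_statistics (repos : List (List (String × Bool))) : String :=
  let total : Int := repos.length
  let pub : Int := repos.foldl (fun acc r => if !(((r.lookup "private").getD false)) then acc + 1 else acc) 0
  let priv : Int := repos.foldl (fun acc r => if ((r.lookup "private").getD false) then acc + 1 else acc) 0
  "| Type   | Count |\n|--------|-------|\n| Total  | " ++ PySem.Int.toStr total ++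
    " |\n| Public | " ++ PySem.Int.toStr pub ++ " |\n| Private| " ++ PySem.Int.toStr priv ++ " |\n"

-- ===== PORT B =====
-- Source B's counts[key] += 1 is ported as Dict.modify; both keys are pre-seeded, so the
-- Python subscript never raises and modify's default 0 is never consulted.
def project_statistics_alt (repos : List (List (String × Bool))) : String :=
  let counts0 : PySem.Dict Bool Int := ((PySem.Dict.empty).insert false 0).insert true 0
  let counts : PySem.Dict Bool Int :=
    repos.foldl (fun d r => d.modify ((r.lookup "private").getD false) 0 (· + 1)) counts0
  let pub : Int := counts.getD false 0
  let priv : Int := counts.getD true 0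
  let total : Int := pub + priv
  "| Type   | Count |\n|--------|-------|\n| Total  | " ++ PySem.Int.toStr total ++
    " |\n| Public | " ++ PySem.Int.toStr pub ++ " |\n| Private| " ++ PySem.Int.toStr priv ++ " |\n"

-- ===== PRECONDITION & SPEC =====
def Spec_project_statistics (repos : List (List (String × Bool))) (out : String) : Prop := out = project_statistics_alt repos
instance (repos : List (List (String × Bool))) (out : String) : Decidable (Spec_project_statistics repos out) := by unfold Spec_project_statistics; infer_instance

-- ===== CLAIM (what is proved, stated in full; the proofs are below) =====
def Claim_equal_project_statistics : Prop := ∀ (repos : List (List (String × Bool))), Dom_project_statistics repos → Spec_project_statistics repos (project_statistics repos)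

-- ===== LEMMAS AND PROOFS =====
-- B's bucket for flag b equals the number of repos whose privacy flag is b.
theorem pv_bucket (repos : List (List (String × Bool))) (b : Bool) :
    (repos.foldl (fun d r => d.modify ((r.lookup "private").getD false) 0 (· + 1))
      (((PySem.Dict.empty).insert false (0:Int)).insert true 0)).getD b 0
    = (repos.countP (fun r => ((r.lookup "private").getD false) == b) : Int) := by
  rw [show (repos.foldl (fun d r => d.modify ((r.lookup "private").getD false) 0 (· + 1))
        (((PySem.Dict.empty).insert false (0:Int)).insert true 0))
      = ((repos.map (fun r => ((r.lookup "private").getD false))).foldl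
          (fun d x => d.modify x 0 (· + 1))
          (((PySem.Dict.empty).insert false (0:Int)).insert true 0))
      from (List.foldl_map (f := fun r : List (String × Bool) => ((r.lookup "private").getD false))
          (g := fun (d : PySem.Dict Bool Int) x => d.modify x 0 (· + 1))
          (l := repos)
          (init := (((PySem.Dict.empty).insert false (0:Int)).insert true 0))).symm,
      PySem.Dict.getD_foldl_modify_add_one]
  have h0 : ((((PySem.Dict.empty).insert false (0:Int)).insert true 0)).getD b 0 = 0 := by
    cases b <;> decide
  rw [h0, List.count, List.countP_map]
  simp only [zero_add]
  rfl

-- ===== VERDICT (by name: the statement is the Claim_ definition above) =====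
theorem project_statistics_spec : Claim_equal_project_statistics := by
  intro repos _
  unfold Spec_project_statistics project_statistics project_statistics_alt
  simp only [pv_bucket, PySem.List.foldl_count_if, zero_add]
  have hpub : (fun r : List (String × Bool) => !(((r.lookup "private").getD false)))
      = (fun r => ((r.lookup "private").getD false) == false) := by
    funext r; cases ((r.lookup "private").getD false) <;> rfl
  have hpriv : (fun r : List (String × Bool) => (((r.lookup "private").getD false)))
      = (fun r => ((r.lookup "private").getD false) == true) := by
    funext r; cases ((r.lookup "private").getD false) <;> rfl
  have hsplit : repos.countP (fun r => ((r.lookup "private").getD false) == false)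
      + repos.countP (fun r => ((r.lookup "private").getD false) == true) = repos.length := by
    have h := List.length_eq_countP_add_countP
      (l := repos) (p := fun r => ((r.lookup "private").getD false) == true)
    have h2 : (fun a : List (String × Bool) => decide (¬(((a.lookup "private").getD false == true) = true)))
        = (fun r => ((r.lookup "private").getD false) == false) := by
      funext a; cases ((a.lookup "private").getD false) <;> decide
    rw [h2] at h; omega
  rw [hpub, hpriv]
  have htot : ((repos.countP (fun r => ((r.lookup "private").getD false) == false) : Int)
      + (repos.countP (fun r => ((r.lookup "private").getD false) == true) : Int))
      = (repos.length : Int) := by omega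
  rw [htot]
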